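-- pv_equiv track=rewrite | github.com/liangrk/WorkFlowSkills | weekly-report/scripts/generate-report.py | _clean_commit_message
-- ===== SOURCE A (Python) =====
-- def _clean_commit_message(message):
--     """清理 commit message,去掉 type 前缀"""
--     prefixes = ['feat:', 'fix:', 'docs:', 'doc:', 'perf:', 'refactor:',
--                 'chore:', 'style:', 'test:', 'build:', 'ci:']
--     msg = message.strip()
--     for prefix in prefixes:
--         if msg.lower().startswith(prefix):
--             msg = msg[len(prefix):].strip()
--             break
--     return msg
-- ===== SOURCE B (Python) =====
-- def _clean_commit_message(message):
--     """清理 commit message,去掉 type 前缀 (partition at the first ':' instead of trying each prefix)"""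
--     msg = message.strip()
--     head, sep, tail = msg.partition(':')
--     if sep and head.lower() in {'feat', 'fix', 'docs', 'doc', 'perf', 'refactor',
--                                 'chore', 'style', 'test', 'build', 'ci'}:
--         return tail.strip()
--     return msg
-- ===== Notes on version B (the rewrite author's own statement) =====
-- stated objective: idiomatic
-- what changed: Instead of trying each of the 11 commit-type prefixes with startswith and slicing off the first match, B partitions the stripped message once at its first colon and tests whether the lowercased head belongs to a set of type words.
import Mathlib
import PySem

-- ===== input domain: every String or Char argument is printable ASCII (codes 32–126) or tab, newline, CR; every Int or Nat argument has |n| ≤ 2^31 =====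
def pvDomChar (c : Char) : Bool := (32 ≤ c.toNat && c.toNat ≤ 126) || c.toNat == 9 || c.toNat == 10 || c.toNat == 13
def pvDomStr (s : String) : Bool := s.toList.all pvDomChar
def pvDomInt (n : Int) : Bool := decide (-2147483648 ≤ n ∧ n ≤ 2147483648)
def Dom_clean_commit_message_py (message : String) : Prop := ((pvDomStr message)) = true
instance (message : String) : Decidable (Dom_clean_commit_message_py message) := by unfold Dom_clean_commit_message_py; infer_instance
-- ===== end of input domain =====

-- B partitions the stripped message at its first ':' and checks the lowercased head against a set
-- of type words, instead of A's loop trying each 'type:' prefix with startswith.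

-- ===== PORT A =====
def pvPrefixes : List String :=
  ["feat:", "fix:", "docs:", "doc:", "perf:", "refactor:",
   "chore:", "style:", "test:", "build:", "ci:"]

-- the for-loop with break: return at the first matching prefix
def pvCleanLoop (msg : String) : List String → String
  | [] => msg
  | p :: ps =>
    if PySem.Str.startswith (PySem.Str.lower msg) p then
      PySem.Str.strip (PySem.Str.slice msg (some (p.length : Int)) none)
    else pvCleanLoop msg ps

def clean_commit_message_py (message : String) : String :=
  pvCleanLoop (PySem.Str.strip message) pvPrefixes

-- ===== PORT B =====
def pvWords : PySem.Set (List Char) :=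
  PySem.Set.ofList
    ["feat".toList, "fix".toList, "docs".toList, "doc".toList, "perf".toList,
     "refactor".toList, "chore".toList, "style".toList, "test".toList,
     "build".toList, "ci".toList]

def clean_commit_message_py_alt (message : String) : String :=
  let msg := PySem.Str.strip message
  let cs := msg.toList
  -- msg.partition(':') ported by hand: scan to the first ':' (exact for a one-char separator)
  let head := cs.takeWhile (fun c => c != ':')
  match cs.dropWhile (fun c => c != ':') with
  | [] => msg
  | _ :: tail =>
    if PySem.Set.contains pvWords (PySem.Chars.lower head) then
      PySem.Str.strip (String.ofList tail)
    else msg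

-- ===== PRECONDITION & SPEC =====
def Spec_clean_commit_message_py (message : String) (out : String) : Prop := out = clean_commit_message_py_alt message
instance (message : String) (out : String) : Decidable (Spec_clean_commit_message_py message out) := by unfold Spec_clean_commit_message_py; infer_instance

-- ===== CLAIM (what is proved, stated in full; the proofs are below) =====
def Claim_equal_clean_commit_message_py : Prop := ∀ (message : String), Dom_clean_commit_message_py message → Spec_clean_commit_message_py message (clean_commit_message_py message)

-- ===== LEMMAS AND PROOFS =====

-- lowering a character neither creates nor destroys a colon
theorem pvLowerChar_colon (c : Char) : (PySem.Chars.lowerChar c != ':') = (c != ':') := by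
  unfold PySem.Chars.lowerChar PySem.Chars.isupper
  split_ifs with h
  · simp only [Bool.and_eq_true, decide_eq_true_eq] at h
    have hn1 : 65 ≤ c.toNat := by
      have h1 := h.1
      rw [Char.le_def, UInt32.le_iff_toNat_le] at h1
      calc (65 : Nat) = ('A' : Char).val.toNat := by decide
        _ ≤ c.val.toNat := h1
    have hn2 : c.toNat ≤ 90 := by
      have h2 := h.2
      rw [Char.le_def, UInt32.le_iff_toNat_le] at h2
      calc c.toNat ≤ ('Z' : Char).val.toNat := h2
        _ = 90 := by decide
    have hvalid : Nat.isValidChar (c.toNat + 32) := Or.inl (by omega)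
    have hv : (Char.ofNat (c.toNat + 32)).toNat = c.toNat + 32 := by
      rw [Char.toNat_ofNat, if_pos hvalid]
    have hne1 : (Char.ofNat (c.toNat + 32) != ':') = true := by
      rw [bne_iff_ne]
      intro he
      rw [he] at hv
      have h58 : (':' : Char).toNat = 58 := by decide
      omega
    have hne2 : (c != ':') = true := by
      rw [bne_iff_ne]
      intro he
      have : c.toNat = 58 := by rw [he]; decide
      omega
    rw [hne1, hne2]
  · rfl

theorem pvLower_comp : ((fun c : Char => c != ':') ∘ PySem.Chars.lowerChar) = (fun c : Char => c != ':') := by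
  funext c
  exact pvLowerChar_colon c

-- a word+':' is a prefix of l  iff  l's run before the first ':' is exactly that word
theorem pvPfx_iff (wl : List Char) (hw : ∀ c ∈ wl, (c != ':') = true) (l : List Char) :
    ((wl ++ [':']) <+: l) ↔
      (l.takeWhile (fun c => c != ':') = wl ∧ l.dropWhile (fun c => c != ':') ≠ []) := by
  induction wl generalizing l with
  | nil =>
    cases l with
    | nil => simp
    | cons a l' =>
      by_cases ha : a = ':'
      · subst ha; simp [List.takeWhile, List.dropWhile]
      · have hb : (a != ':') = true := by simpa using ha
        simp only [List.nil_append, List.takeWhile, List.dropWhile, hb, List.cons_prefix_cons]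
        constructor
        · rintro ⟨he, -⟩; exact absurd he.symm ha
        · rintro ⟨he, -⟩; exact absurd (by simpa using congrArg List.head? he) ha
  | cons c wl ih =>
    have hc : (c != ':') = true := hw c (by simp)
    have hw' : ∀ x ∈ wl, (x != ':') = true := fun x hx => hw x (by simp [hx])
    cases l with
    | nil => simp
    | cons a l' =>
      by_cases hac : a = ':'
      · subst hac
        have hcc : ¬ (c = ':') := by simpa using hc
        simp [List.takeWhile, List.dropWhile, List.cons_prefix_cons, hcc]
      · have hab : (a != ':') = true := by simpa using hac
        by_cases hca : c = a
        · subst hca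
          simp [List.takeWhile, List.dropWhile, hab, List.cons_prefix_cons, ih hw' l']
        · have ht : (a :: l').takeWhile (fun c => c != ':') =
              a :: l'.takeWhile (fun c => c != ':') := by
            simp [hab]
          rw [ht]
          constructor
          · intro hpf
            rw [List.cons_append, List.cons_prefix_cons] at hpf
            exact absurd hpf.1 hca
          · rintro ⟨he, -⟩
            injection he with he1 _
            exact absurd he1.symm hca

-- the first element surviving dropWhile is a colon
theorem pvDrop_head (l : List Char) :
    l.dropWhile (fun c => c != ':') = [] ∨
      ∃ t, l.dropWhile (fun c => c != ':') = ':' :: t := by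
  induction l with
  | nil => exact Or.inl rfl
  | cons a l' ih =>
    by_cases ha : a = ':'
    · subst ha; exact Or.inr ⟨l', by simp [List.dropWhile]⟩
    · have hb : (a != ':') = true := by simpa using ha
      simpa [List.dropWhile, hb] using ih

-- A's startswith test, characterised through B's partition of the (unlowered) message
theorem pvStartswith_char (msg : String) (wl : List Char) (hw : ∀ c ∈ wl, (c != ':') = true) :
    PySem.Str.startswith (PySem.Str.lower msg) (String.ofList (wl ++ [':'])) = true ↔
      (PySem.Chars.lower (msg.toList.takeWhile (fun c => c != ':')) = wl ∧
        msg.toList.dropWhile (fun c => c != ':') ≠ []) := by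
  rw [PySem.Str.startswith_eq, PySem.Chars.startswith_iff, PySem.Str.toList_lower,
    String.toList_ofList]
  unfold PySem.Chars.lower
  rw [pvPfx_iff wl hw, List.takeWhile_map, List.dropWhile_map, pvLower_comp]
  constructor
  · rintro ⟨h1, h2⟩
    exact ⟨h1, by simpa using h2⟩
  · rintro ⟨h1, h2⟩
    exact ⟨h1, by simpa using h2⟩

-- when the word matches, A's slice after the prefix is exactly B's tail after the first ':'
theorem pvSlice_tail (msg : String) (wl : List Char) (tail : List Char)
    (h1 : PySem.Chars.lower (msg.toList.takeWhile (fun c => c != ':')) = wl)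
    (h2 : msg.toList.dropWhile (fun c => c != ':') = ':' :: tail) :
    PySem.Str.slice msg (some ((wl.length + 1 : Nat) : Int)) none = String.ofList tail := by
  have hlen : (msg.toList.takeWhile (fun c => c != ':')).length = wl.length := by
    rw [← h1]; unfold PySem.Chars.lower; simp
  have hsplit : msg.toList =
      (msg.toList.takeWhile (fun c => c != ':') ++ [':']) ++ tail := by
    conv_lhs => rw [← List.takeWhile_append_dropWhile
      (p := fun c : Char => c != ':') (l := msg.toList)]
    rw [h2]; simp
  have htl : (PySem.Str.slice msg (some ((wl.length + 1 : Nat) : Int)) none).toList = tail := by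
    rw [PySem.Str.toList_slice, PySem.Chars.slice_eq_listSlice,
      PySem.List.slice_from_natCast, hsplit]
    have : wl.length + 1 = (msg.toList.takeWhile (fun c => c != ':') ++ [':']).length := by
      simp [hlen]
    rw [this, List.drop_left]
  rw [← htl, String.ofList_toList]

-- the loop over word+':' prefixes, computed by B's partition-and-lookup
theorem pvLoop_eq (msg : String) (ws : List (List Char))
    (hw : ∀ w ∈ ws, ∀ c ∈ w, (c != ':') = true) :
    pvCleanLoop msg (ws.map (fun w => String.ofList (w ++ [':']))) =
      (match msg.toList.dropWhile (fun c => c != ':') with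
       | [] => msg
       | _ :: tail =>
         if ws.contains (PySem.Chars.lower (msg.toList.takeWhile (fun c => c != ':'))) then
           PySem.Str.strip (String.ofList tail)
         else msg) := by
  induction ws with
  | nil =>
    rcases pvDrop_head msg.toList with h | ⟨t, h⟩ <;> simp [pvCleanLoop, h]
  | cons w ws ih =>
    have hww : ∀ c ∈ w, (c != ':') = true := hw w (by simp)
    have hw' : ∀ x ∈ ws, ∀ c ∈ x, (c != ':') = true := fun x hx => hw x (by simp [hx])
    simp only [List.map_cons, pvCleanLoop]
    by_cases hs : PySem.Str.startswith (PySem.Str.lower msg) (String.ofList (w ++ [':'])) = true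
    · rw [if_pos hs]
      obtain ⟨h1, h2⟩ := (pvStartswith_char msg w hww).mp hs
      rcases pvDrop_head msg.toList with h | ⟨t, h⟩
      · exact absurd h h2
      · simp only [h]
        have hcontains : ((w :: ws).contains
            (PySem.Chars.lower (msg.toList.takeWhile (fun c => c != ':')))) = true := by
          simp [h1]
        rw [if_pos hcontains]
        have hlen : ((String.ofList (w ++ [':'])).length : Int) = ((w.length + 1 : Nat) : Int) := by
          simp
          decide
        rw [hlen, pvSlice_tail msg w t h1 h]
    · rw [if_neg hs, ih hw']
      rcases pvDrop_head msg.toList with h | ⟨t, h⟩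
      · simp only [h]
      · simp only [h]
        have hne : PySem.Chars.lower (msg.toList.takeWhile (fun c => c != ':')) ≠ w := by
          intro he
          exact hs ((pvStartswith_char msg w hww).mpr ⟨he, by rw [h]; simp⟩)
        simp [hne]

theorem pvPrefixes_eq :
    pvPrefixes = (["feat".toList, "fix".toList, "docs".toList, "doc".toList, "perf".toList,
      "refactor".toList, "chore".toList, "style".toList, "test".toList,
      "build".toList, "ci".toList]).map (fun w => String.ofList (w ++ [':'])) := by
  simp [pvPrefixes]

-- ===== VERDICT (by name: the statement is the Claim_ definition above) =====
set_option maxRecDepth 100000 in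
theorem clean_commit_message_py_spec : Claim_equal_clean_commit_message_py := by
  intro message _
  unfold Spec_clean_commit_message_py clean_commit_message_py clean_commit_message_py_alt
  have hwall : ∀ w ∈ (["feat".toList, "fix".toList, "docs".toList, "doc".toList, "perf".toList,
      "refactor".toList, "chore".toList, "style".toList, "test".toList,
      "build".toList, "ci".toList] : List (List Char)), ':' ∉ w := by decide
  rw [pvPrefixes_eq, pvLoop_eq _ _ (by
    intro w hwmem c hc
    rw [bne_iff_ne]
    rintro rfl
    exact hwall w hwmem hc)]
  have hset : pvWords =
      ["feat".toList, "fix".toList, "docs".toList, "doc".toList, "perf".toList,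
       "refactor".toList, "chore".toList, "style".toList, "test".toList,
       "build".toList, "ci".toList] := by decide
  simp only [hset, PySem.Set.contains]
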